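-- pv_equiv track=rewrite | github.com/Clear-Love/leetcode | code/2386.py | kSum
-- ===== SOURCE A (Python) =====
-- import heapq
-- from typing import List
--
-- def kSum(nums: List[int], k: int) -> int:
--     sum = 0
--     for i, x in enumerate(nums):
--         if x >= 0:
--             sum += x
--         else:
--             nums[i] = -x
--     nums.sort()
--
--     h = [(0, 0)]  # 空子序列
--     for _ in range(k - 1):
--         s, i = heapq.heappop(h)
--         if i < len(nums):
--             # 在子序列的末尾添加 nums[i]
--             heapq.heappush(h, (s + nums[i], i + 1))  # 下一个添加/替换的元素下标为 i+1
--             if i:  # 替换子序列的末尾元素为 nums[i]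
--                 heapq.heappush(h, (s + nums[i] - nums[i - 1], i + 1))
--     return sum - h[0][0]
-- ===== SOURCE B (Python) =====
-- def kSum(nums, k):
--     total = 0
--     for i, x in enumerate(nums):
--         if x >= 0:
--             total += x
--         else:
--             nums[i] = -x
--     nums.sort()
--
--     m = max(k, 1)
--     best = [0]  # the (at most m) smallest subset sums of the processed prefix, ascending
--     for x in nums:
--         best = _merge(best, [b + x for b in best])[:m]
--     return total - best[m - 1]
--
--
-- def _merge(u, v):
--     res = []
--     i = j = 0
--     while i < len(u) and j < len(v):
--         if u[i] <= v[j]: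
--             res.append(u[i]); i += 1
--         else:
--             res.append(v[j]); j += 1
--     res.extend(u[i:]); res.extend(v[j:])
--     return res
-- ===== Notes on version B (the rewrite author's own statement) =====
-- stated objective: alternative
-- what changed: Replaces the lazy best-first heap enumeration of subset sums by a prefix dynamic programme that keeps, for each processed element, the (at most max(k,1)) smallest subset sums of the prefix via a sorted two-list merge, then reads off the k-th smallest directly.
import Mathlib
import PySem

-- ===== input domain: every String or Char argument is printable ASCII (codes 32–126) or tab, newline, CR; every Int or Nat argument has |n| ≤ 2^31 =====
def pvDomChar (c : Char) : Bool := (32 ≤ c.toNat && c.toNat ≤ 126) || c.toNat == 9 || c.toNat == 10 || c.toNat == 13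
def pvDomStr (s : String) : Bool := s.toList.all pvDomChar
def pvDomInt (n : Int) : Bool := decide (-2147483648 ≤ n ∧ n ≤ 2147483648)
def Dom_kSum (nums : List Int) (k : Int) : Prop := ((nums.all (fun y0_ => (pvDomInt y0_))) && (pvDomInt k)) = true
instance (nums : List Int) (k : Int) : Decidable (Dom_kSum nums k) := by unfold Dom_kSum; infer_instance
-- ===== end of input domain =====

-- B replaces A's lazy best-first heap enumeration of subset sums by a prefix DP
-- keeping the max(k,1) smallest subset sums of each prefix (sorted-merge step);
-- equivalence is about the RETURN value (both programs mutate `nums` identically: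
-- negate the negatives, then sort in place).

-- ===== PORT A =====
-- shared-shape preprocessing of A: sum of nonnegatives, list of absolute values
def ppA (nums : List Int) : Int × List Int :=
  nums.foldl (fun p x => if 0 ≤ x then (p.1 + x, p.2 ++ [x]) else (p.1, p.2 ++ [-x])) ((0:Int), ([]:List Int))

-- heapq model: the heap as a list kept sorted by the lexicographic order on (s, i);
-- heappush = ordered insert, heappop = head, h[0] = head.  Exact on values: heappop
-- always returns the minimum pair and equal pairs are indistinguishable.
def hpush (y : Int × Int) : List (Int × Int) → List (Int × Int)
  | [] => [y]
  | x :: xs => if y.1 < x.1 ∨ (y.1 = x.1 ∧ y.2 ≤ x.2) then y :: x :: xs else x :: hpush y xs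

-- one iteration of A's loop body (pop; if i < len: push child(ren))
def stepA (a : List Int) (h : List (Int × Int)) : List (Int × Int) :=
  match h with
  | [] => []  -- Python would raise IndexError here; unreachable under Pre_kSum
  | (s, i) :: rest =>
    if i < (a.length : Int) then
      let r1 := hpush (s + PySem.List.pyGetD a i 0, i + 1) rest
      if i ≠ 0 then hpush (s + PySem.List.pyGetD a i 0 - PySem.List.pyGetD a (i - 1) 0, i + 1) r1
      else r1
    else rest

def kSum (nums : List Int) (k : Int) : Int :=
  let p := ppA nums
  let a := PySem.List.sorted p.2 (fun x => x) false
  let h := (List.range (k - 1).toNat).foldl (fun h _ => stepA a h) [((0:Int), (0:Int))]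
  p.1 - (h.headD (0, 0)).1

-- ===== PORT B =====
-- Source B's _merge: two-pointer merge of two sorted lists
def bmerge : List Int → List Int → List Int
  | [], v => v
  | u, [] => u
  | a :: u, b :: v => if a ≤ b then a :: bmerge u (b :: v) else b :: bmerge (a :: u) v
termination_by u v => u.length + v.length

def kSum_alt (nums : List Int) (k : Int) : Int :=
  -- B's preprocessing is the same code as A's, kept verbatim in Source B for the in-place mutation
  let p := nums.foldl (fun p x => if 0 ≤ x then (p.1 + x, p.2 ++ [x]) else (p.1, p.2 ++ [-x])) ((0:Int), ([]:List Int))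
  let a := PySem.List.sorted p.2 (fun x => x) false
  let m := max k 1
  let best := a.foldl (fun best x => (bmerge best (best.map (fun b => b + x))).take m.toNat) [(0:Int)]
  p.1 - best.getD (m - 1).toNat 0

-- ===== PRECONDITION & SPEC =====
-- Pre_ excludes exactly the inputs where A raises IndexError (the heap runs out:
-- fewer than k subsequences exist, i.e. k > 2^len(nums)); B raises there too.
def Pre_kSum (nums : List Int) (k : Int) : Prop := k ≤ 2 ^ nums.length
instance (nums : List Int) (k : Int) : Decidable (Pre_kSum nums k) := by unfold Pre_kSum; infer_instance
def pvWitness_kSum : List Int × Int := ([1, -2], 3)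

def Spec_kSum (nums : List Int) (k : Int) (out : Int) : Prop := out = kSum_alt nums k
instance (nums : List Int) (k : Int) (out : Int) : Decidable (Spec_kSum nums k out) := by unfold Spec_kSum; infer_instance

-- ===== CLAIM (what is proved, stated in full; the proofs are below) =====
def Claim_equal_kSum : Prop := ∀ (nums : List Int) (k : Int), Dom_kSum nums k → Pre_kSum nums k → Spec_kSum nums k (kSum nums k)

-- ===== LEMMAS AND PROOFS =====

-- ---- generic order: the lexicographic order used by the heap model
def lexLe (y x : Int × Int) : Prop := y.1 < x.1 ∨ (y.1 = x.1 ∧ y.2 ≤ x.2)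

-- ---- multiset of subset sums of a list, and of its nonempty subsets
def subsM : List Int → Multiset Int
  | [] => {0}
  | x :: l => subsM l + (subsM l).map (· + x)

def nsubsM : List Int → Multiset Int
  | [] => 0
  | x :: l => nsubsM l + (subsM l).map (· + x)

-- ---- the enumeration tree of A (same child expressions as stepA)
def subt (a : List Int) (p : Int × Int) : Multiset (Int × Int) :=
  if h : p.2 < (a.length : Int) then
    if p.2 ≠ 0 then
      p ::ₘ (subt a (p.1 + PySem.List.pyGetD a p.2 0, p.2 + 1) +
             subt a (p.1 + PySem.List.pyGetD a p.2 0 - PySem.List.pyGetD a (p.2 - 1) 0, p.2 + 1))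
    else p ::ₘ subt a (p.1 + PySem.List.pyGetD a p.2 0, p.2 + 1)
  else {p}
termination_by ((a.length : Int) - p.2).toNat
decreasing_by all_goals omega

-- canonical ascending list of a multiset of ints
def SL (s : Multiset Int) : List Int := Multiset.sort s

-- lexLe basics
theorem le_of_lexLe (y x : Int × Int) (h : lexLe y x) : y.1 ≤ x.1 := by
  rcases h with h | ⟨h, _⟩ <;> omega

theorem lexLe_total (y x : Int × Int) (h : ¬ lexLe y x) : lexLe x y := by
  unfold lexLe at *; omega

theorem lexLe_trans (x y z : Int × Int) (h1 : lexLe x y) (h2 : lexLe y z) : lexLe x z := by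
  unfold lexLe at *; omega

-- shift: add a constant to every element of a multiset
def shift (c : Int) (S : Multiset Int) : Multiset Int := S.map (fun t => c + t)

theorem shift_add (c : Int) (S T : Multiset Int) : shift c (S + T) = shift c S + shift c T := by
  simp [shift]

theorem shift_shift (c d : Int) (S : Multiset Int) : shift c (shift d S) = shift (c + d) S := by
  simp [shift, Multiset.map_map]; congr 1; funext t; ring

theorem shift_congr (c d : Int) (S : Multiset Int) (h : c = d) : shift c S = shift d S := by rw [h]

theorem shift_zero (S : Multiset Int) : shift 0 S = S := by
  simp [shift]

theorem map_add_right (x : Int) (S : Multiset Int) : S.map (· + x) = shift x S := by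
  simp only [shift]; congr 1; funext t; ring

-- subsM basics
theorem subs_card (l : List Int) : (subsM l).card = 2 ^ l.length := by
  induction l with
  | nil => simp [subsM]
  | cons x l ih => simp [subsM, ih, pow_succ]; omega

theorem subs_eq_cons (l : List Int) : subsM l = 0 ::ₘ nsubsM l := by
  induction l with
  | nil => simp [subsM, nsubsM]
  | cons x l ih =>
    show subsM l + (subsM l).map (· + x) = 0 ::ₘ (nsubsM l + (subsM l).map (· + x))
    rw [ih]
    simp only [Multiset.cons_add, Multiset.map_cons, zero_add, Multiset.add_cons]
    rw [Multiset.cons_swap]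

theorem subsM_swap (x y : Int) (l : List Int) : subsM (x :: y :: l) = subsM (y :: x :: l) := by
  show subsM (y :: l) + (subsM (y :: l)).map (· + x) = subsM (x :: l) + (subsM (x :: l)).map (· + y)
  show (subsM l + (subsM l).map (· + y)) + (subsM l + (subsM l).map (· + y)).map (· + x)
     = (subsM l + (subsM l).map (· + x)) + (subsM l + (subsM l).map (· + x)).map (· + y)
  simp only [map_add_right, shift_add, shift_shift]
  rw [shift_congr (x + y) (y + x) _ (by ring)]
  abel

theorem subsM_perm (l l' : List Int) (h : l.Perm l') : subsM l = subsM l' := by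
  induction h with
  | nil => rfl
  | cons x _ ih => show subsM _ + _ = subsM _ + _; rw [ih]
  | swap x y l => exact (subsM_swap y x l)
  | trans _ _ ih1 ih2 => exact ih1.trans ih2

-- subt equations
theorem subt_leaf (a : List Int) (p : Int × Int) (h : ¬ p.2 < (a.length : Int)) : subt a p = {p} := by
  rw [subt]; simp [h]

theorem subt_node0 (a : List Int) (s : Int) (h : (0:Int) < (a.length : Int)) :
    subt a (s, 0) = (s, 0) ::ₘ subt a (s + PySem.List.pyGetD a 0 0, 1) := by
  rw [subt]; simp only [h]; simp

theorem subt_node (a : List Int) (s i : Int) (h : i < (a.length : Int)) (hi : i ≠ 0) :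
    subt a (s, i) = (s, i) ::ₘ (subt a (s + PySem.List.pyGetD a i 0, i + 1) +
      subt a (s + PySem.List.pyGetD a i 0 - PySem.List.pyGetD a (i - 1) 0, i + 1)) := by
  rw [subt]; simp [h, hi]

theorem subt_self_mem (a : List Int) (p : Int × Int) : p ∈ subt a p := by
  rw [subt]; split_ifs <;> simp

theorem key_alg (s g g' : Int) (D N : Multiset Int) (hD : D = 0 ::ₘ N) :
    s ::ₘ (shift (s + g) D + shift (s + g - g) N + (shift (s + g - g') D + shift (s + g - g' - g) N))
    = shift s D + shift (s + g) D + (shift (s - g') N + shift (s - g' + g) D) := by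
  have h1 : shift s D = s ::ₘ shift s N := by subst hD; simp [shift]
  rw [shift_congr (s + g - g) s _ (by ring), shift_congr (s + g - g' - g) (s - g') _ (by ring),
      shift_congr (s - g' + g) (s + g - g') _ (by ring), h1,
      ← Multiset.singleton_add s (shift s N), ← Multiset.singleton_add s
        (shift (s + g) D + shift s N + (shift (s + g - g') D + shift (s - g') N))]
  abel

theorem subt_fst_aux (a : List Int) : ∀ (d : Nat) (s i : Int), 1 ≤ i → i + d = (a.length : Int) →
    (subt a (s, i)).map Prod.fst
      = shift s (subsM (a.drop i.toNat)) +
        shift (s - PySem.List.pyGetD a (i - 1) 0) (nsubsM (a.drop i.toNat)) := by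
  intro d
  induction d with
  | zero =>
    intro s i h1 h2
    rw [subt_leaf a (s, i) (by push_cast; omega)]
    have hdrop : a.drop i.toNat = [] := List.drop_of_length_le (by omega)
    simp [hdrop, subsM, nsubsM, shift]
  | succ d ih =>
    intro s i h1 h2
    have hlt : i < (a.length : Int) := by omega
    have hlen : i.toNat < a.length := by omega
    rw [subt_node a s i hlt (by omega)]
    have hg : PySem.List.pyGetD a i 0 = a[i.toNat] := PySem.List.pyGetD_eq_getElem a 0 (by omega) hlt
    have hdrop : a.drop i.toNat = a[i.toNat] :: a.drop (i.toNat + 1) := List.drop_eq_getElem_cons hlen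
    have hsucc : (i + 1).toNat = i.toNat + 1 := by omega
    have ih1 := ih (s + PySem.List.pyGetD a i 0) (i + 1) (by omega) (by omega)
    have ih2 := ih (s + PySem.List.pyGetD a i 0 - PySem.List.pyGetD a (i - 1) 0) (i + 1) (by omega) (by omega)
    rw [show i + 1 - 1 = i by ring] at ih1 ih2
    rw [Multiset.map_cons, Multiset.map_add, ih1, ih2, hdrop, hsucc]
    simp only [subsM, nsubsM, map_add_right, shift_add, shift_shift, hg]
    exact key_alg s (a[i.toNat]) (PySem.List.pyGetD a (i - 1) 0) _ _ (subs_eq_cons _)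

theorem subt_fst_root (a : List Int) : (subt a (0, 0)).map Prod.fst = subsM a := by
  cases a with
  | nil =>
    rw [subt_leaf [] (0, 0) (by simp)]
    simp [subsM]
  | cons y l =>
    rw [subt_node0 (y :: l) 0 (by simp)]
    have h0 : PySem.List.pyGetD (y :: l) 0 0 = y := by
      rw [PySem.List.pyGetD_eq_getElem (y :: l) 0 (by omega) (by simp)]; simp
    have haux := subt_fst_aux (y :: l) l.length (0 + PySem.List.pyGetD (y :: l) 0 0) 1
      (by omega) (by simp [List.length_cons]; omega)
    rw [Multiset.map_cons, haux]
    have hdrop : (y :: l).drop (1 : Int).toNat = l := by simp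
    rw [hdrop, h0]
    rw [show (1 : Int) - 1 = 0 by ring, h0]
    show (0:Int) ::ₘ (shift (0 + y) (subsM l) + shift (0 + y - y) (nsubsM l)) = subsM (y :: l)
    rw [shift_congr (0 + y) y _ (by ring), shift_congr (0 + y - y) 0 _ (by ring), shift_zero]
    show _ = subsM l + (subsM l).map (· + y)
    rw [map_add_right, subs_eq_cons l]
    simp only [← Multiset.singleton_add]
    abel

theorem subt_wt_aux (a : List Int) (ha : a.Pairwise (· ≤ ·)) (hnn : ∀ x ∈ a, 0 ≤ x) :
    ∀ (d : Nat) (s i : Int), 0 ≤ i → (a.length : Int) ≤ i + d → ∀ q ∈ subt a (s, i), s ≤ q.1 := by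
  intro d
  induction d with
  | zero =>
    intro s i h0 hle q hq
    rw [subt_leaf a (s, i) (by simp; omega)] at hq
    simp at hq; rw [hq]
  | succ d ih =>
    intro s i h0 hle q hq
    by_cases hlt : i < (a.length : Int)
    · have hg : PySem.List.pyGetD a i 0 = a[i.toNat] := PySem.List.pyGetD_eq_getElem a 0 h0 hlt
      have hgnn : (0:Int) ≤ PySem.List.pyGetD a i 0 := by
        rw [hg]; exact hnn _ (List.getElem_mem _)
      by_cases hi0 : i = 0
      · subst hi0
        rw [subt_node0 a s (by omega)] at hq
        rcases Multiset.mem_cons.mp hq with hq | hq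
        · rw [hq]
        · have := ih (s + PySem.List.pyGetD a 0 0) 1 (by omega) (by omega) q hq
          omega
      · rw [subt_node a s i hlt hi0] at hq
        rcases Multiset.mem_cons.mp hq with hq | hq
        · rw [hq]
        · have hg' : PySem.List.pyGetD a (i - 1) 0 = a[(i - 1).toNat] :=
            PySem.List.pyGetD_eq_getElem a 0 (by omega) (by omega)
          have hle2 : a[(i - 1).toNat] ≤ a[i.toNat] :=
            List.pairwise_iff_getElem.mp ha (i - 1).toNat i.toNat (by omega) (by omega) (by omega)
          rcases Multiset.mem_add.mp hq with hq | hq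
          · have := ih (s + PySem.List.pyGetD a i 0) (i + 1) (by omega) (by omega) q hq
            omega
          · have := ih (s + PySem.List.pyGetD a i 0 - PySem.List.pyGetD a (i - 1) 0) (i + 1)
              (by omega) (by omega) q hq
            rw [hg, hg'] at this
            omega
    · rw [subt_leaf a (s, i) hlt] at hq
      simp at hq; rw [hq]

theorem subt_wt_le (a : List Int) (ha : a.Pairwise (· ≤ ·)) (h0 : ∀ x ∈ a, 0 ≤ x)
    (s i : Int) (hi : 0 ≤ i) : ∀ q ∈ subt a (s, i), s ≤ q.1 :=
  subt_wt_aux a ha h0 a.length s i hi (by omega)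

-- heap-model lemmas
theorem hpush_perm (y : Int × Int) (l : List (Int × Int)) : (hpush y l).Perm (y :: l) := by
  induction l with
  | nil => exact List.Perm.refl _
  | cons x xs ih =>
    show (if y.1 < x.1 ∨ (y.1 = x.1 ∧ y.2 ≤ x.2) then y :: x :: xs else x :: hpush y xs).Perm _
    split_ifs with h
    · exact List.Perm.refl _
    · exact (ih.cons x).trans (List.Perm.swap y x xs)

theorem mem_hpush (z y : Int × Int) (l : List (Int × Int)) : z ∈ hpush y l ↔ z = y ∨ z ∈ l := by
  rw [(hpush_perm y l).mem_iff]; simp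

theorem hpush_pairwise (y : Int × Int) (l : List (Int × Int)) (hl : l.Pairwise lexLe) :
    (hpush y l).Pairwise lexLe := by
  induction l with
  | nil => simp [hpush, List.pairwise_cons]
  | cons x xs ih =>
    show (if y.1 < x.1 ∨ (y.1 = x.1 ∧ y.2 ≤ x.2) then y :: x :: xs else x :: hpush y xs).Pairwise lexLe
    rcases List.pairwise_cons.mp hl with ⟨hx, hxs⟩
    split_ifs with h
    · refine List.pairwise_cons.mpr ⟨?_, hl⟩
      intro z hz
      rcases List.mem_cons.mp hz with hz | hz
      · rw [hz]; exact h
      · exact lexLe_trans y x z h (hx z hz)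
    · refine List.pairwise_cons.mpr ⟨?_, ih hxs⟩
      intro z hz
      rcases (mem_hpush z y xs).mp hz with hz | hz
      · rw [hz]; exact lexLe_total y x h
      · exact hx z hz

theorem sum_map_hpush {β : Type} [AddCommMonoid β] (f : Int × Int → β) (y : Int × Int)
    (l : List (Int × Int)) : ((hpush y l).map f).sum = f y + (l.map f).sum := by
  induction l with
  | nil => simp [hpush]
  | cons x xs ih =>
    show ((if y.1 < x.1 ∨ (y.1 = x.1 ∧ y.2 ≤ x.2) then y :: x :: xs else x :: hpush y xs).map f).sum = _
    split_ifs with h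
    · simp
    · simp only [List.map_cons, List.sum_cons, ih]
      rw [← add_assoc, ← add_assoc, add_comm (f x) (f y)]

theorem head_min (p : Int × Int) (rest : List (Int × Int)) (hp : (p :: rest).Pairwise lexLe) :
    ∀ q ∈ p :: rest, p.1 ≤ q.1 := by
  intro q hq
  rcases List.mem_cons.mp hq with hq | hq
  · rw [hq]
  · exact le_of_lexLe p q ((List.pairwise_cons.mp hp).1 q hq)

theorem mem_msum {α : Type} {l : List (Multiset α)} {y : α} : y ∈ l.sum ↔ ∃ m ∈ l, y ∈ m := by
  induction l with
  | nil => simp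
  | cons m ms ih => simp [ih]

theorem card_subt_root (a : List Int) : (subt a (0, 0)).card = 2 ^ a.length := by
  rw [← Multiset.card_map Prod.fst, subt_fst_root, subs_card]

-- the loop invariant of A's heap loop
def InvA (a : List Int) (P : Multiset (Int × Int)) (h : List (Int × Int)) : Prop :=
  P + (h.map (subt a)).sum = subt a (0, 0) ∧
  (∀ x ∈ P, ∀ y ∈ h, x.1 ≤ y.1) ∧
  h.Pairwise lexLe ∧ (∀ p ∈ h, 0 ≤ p.2)

theorem stepA_inv (a : List Int) (hs : a.Pairwise (· ≤ ·)) (hnn : ∀ x ∈ a, 0 ≤ x)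
    (P : Multiset (Int × Int)) (p : Int × Int) (rest : List (Int × Int))
    (hInv : InvA a P (p :: rest)) : InvA a (p ::ₘ P) (stepA a (p :: rest)) := by
  obtain ⟨h1, h2, h3, h4⟩ := hInv
  obtain ⟨s, i⟩ := p
  have hi0 : (0:Int) ≤ i := h4 (s, i) (List.mem_cons_self)
  have hrest_pair := (List.pairwise_cons.mp h3).2
  have hhead := head_min (s, i) rest h3
  by_cases hlt : i < (a.length : Int)
  · have hg : PySem.List.pyGetD a i 0 = a[i.toNat] := PySem.List.pyGetD_eq_getElem a 0 hi0 hlt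
    have hgnn : (0:Int) ≤ PySem.List.pyGetD a i 0 := by
      rw [hg]; exact hnn _ (List.getElem_mem _)
    by_cases hi : i ≠ 0
    · have hg' : PySem.List.pyGetD a (i - 1) 0 = a[(i - 1).toNat] :=
        PySem.List.pyGetD_eq_getElem a 0 (by omega) (by omega)
      have hle' : PySem.List.pyGetD a (i - 1) 0 ≤ PySem.List.pyGetD a i 0 := by
        rw [hg, hg']
        exact List.pairwise_iff_getElem.mp hs (i - 1).toNat i.toNat (by omega) (by omega) (by omega)
      have hstep : stepA a ((s, i) :: rest) =
          hpush (s + PySem.List.pyGetD a i 0 - PySem.List.pyGetD a (i - 1) 0, i + 1)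
            (hpush (s + PySem.List.pyGetD a i 0, i + 1) rest) := by
        simp [stepA, hlt, hi]
      rw [hstep]
      refine ⟨?_, ?_, ?_, ?_⟩
      · rw [sum_map_hpush, sum_map_hpush, ← h1]
        simp only [List.map_cons, List.sum_cons]
        rw [subt_node a s i hlt hi]
        simp only [← Multiset.singleton_add]
        abel
      · intro x hx y hy
        rcases (mem_hpush _ _ _).mp hy with hy | hy
        · have : s ≤ y.1 := by rw [hy]; simp; omega
          rcases Multiset.mem_cons.mp hx with hx | hx
          · rw [hx]; exact this
          · exact le_trans (h2 x hx (s, i) List.mem_cons_self) this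
        · rcases (mem_hpush _ _ _).mp hy with hy | hy
          · have : s ≤ y.1 := by rw [hy]; simp; omega
            rcases Multiset.mem_cons.mp hx with hx | hx
            · rw [hx]; exact this
            · exact le_trans (h2 x hx (s, i) List.mem_cons_self) this
          · rcases Multiset.mem_cons.mp hx with hx | hx
            · rw [hx]; exact hhead y (List.mem_cons_of_mem _ hy)
            · exact h2 x hx y (List.mem_cons_of_mem _ hy)
      · exact hpush_pairwise _ _ (hpush_pairwise _ _ hrest_pair)
      · intro q hq
        rcases (mem_hpush _ _ _).mp hq with hq | hq
        · rw [hq]; simp; omega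
        · rcases (mem_hpush _ _ _).mp hq with hq | hq
          · rw [hq]; simp; omega
          · exact h4 q (List.mem_cons_of_mem _ hq)
    · rw [not_not] at hi
      subst hi
      have hstep : stepA a ((s, 0) :: rest) = hpush (s + PySem.List.pyGetD a 0 0, 1) rest := by
        simp [stepA]
        intro ha; subst ha; simp at hlt
      rw [hstep]
      refine ⟨?_, ?_, ?_, ?_⟩
      · rw [sum_map_hpush, ← h1]
        simp only [List.map_cons, List.sum_cons]
        rw [subt_node0 a s (by omega)]
        simp only [← Multiset.singleton_add]
        abel
      · intro x hx y hy
        rcases (mem_hpush _ _ _).mp hy with hy | hy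
        · have : s ≤ y.1 := by rw [hy]; simp; omega
          rcases Multiset.mem_cons.mp hx with hx | hx
          · rw [hx]; exact this
          · exact le_trans (h2 x hx (s, 0) List.mem_cons_self) this
        · rcases Multiset.mem_cons.mp hx with hx | hx
          · rw [hx]; exact hhead y (List.mem_cons_of_mem _ hy)
          · exact h2 x hx y (List.mem_cons_of_mem _ hy)
      · exact hpush_pairwise _ _ hrest_pair
      · intro q hq
        rcases (mem_hpush _ _ _).mp hq with hq | hq
        · rw [hq]; simp
        · exact h4 q (List.mem_cons_of_mem _ hq)
  · have hstep : stepA a ((s, i) :: rest) = rest := by simp [stepA, hlt]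
    rw [hstep]
    refine ⟨?_, ?_, ?_, ?_⟩
    · rw [← h1]
      simp only [List.map_cons, List.sum_cons]
      rw [subt_leaf a (s, i) hlt]
      simp only [← Multiset.singleton_add]
      abel
    · intro x hx y hy
      rcases Multiset.mem_cons.mp hx with hx | hx
      · rw [hx]; exact hhead y (List.mem_cons_of_mem _ hy)
      · exact h2 x hx y (List.mem_cons_of_mem _ hy)
    · exact hrest_pair
    · intro q hq; exact h4 q (List.mem_cons_of_mem _ hq)

theorem heap_nonempty (a : List Int) (P : Multiset (Int × Int)) (h : List (Int × Int))
    (hInv : InvA a P h) (hcard : P.card < 2 ^ a.length) : h ≠ [] := by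
  intro he
  subst he
  have h1 := hInv.1
  simp at h1
  rw [h1] at hcard
  rw [card_subt_root] at hcard
  omega

theorem loopA (a : List Int) (hs : a.Pairwise (· ≤ ·)) (hnn : ∀ x ∈ a, 0 ≤ x) :
    ∀ N : Nat, N < 2 ^ a.length →
      ∃ P, InvA a P ((stepA a)^[N] [((0:Int), (0:Int))]) ∧ P.card = N := by
  intro N
  induction N with
  | zero =>
    intro _
    refine ⟨0, ⟨?_, ?_, ?_, ?_⟩, rfl⟩
    · simp
    · intro x hx; simp at hx
    · simp
    · intro p hp; simp at hp; rw [hp]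
  | succ N ih =>
    intro hN
    obtain ⟨P, hInv, hcard⟩ := ih (by omega)
    have hne := heap_nonempty a P _ hInv (by omega)
    obtain ⟨p, rest, heq⟩ := List.exists_cons_of_ne_nil hne
    rw [Function.iterate_succ_apply', heq]
    rw [heq] at hInv
    exact ⟨p ::ₘ P, stepA_inv a hs hnn P p rest hInv, by simp [hcard]⟩

theorem foldl_const_range {α : Type} (f : α → α) (x : α) (N : Nat) :
    (List.range N).foldl (fun h _ => f h) x = f^[N] x := by
  induction N with
  | zero => rfl
  | succ N ih => rw [List.range_succ, List.foldl_append, ih, Function.iterate_succ_apply']; rfl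

theorem SL_unique (S : Multiset Int) (l : List Int) (hco : (↑l : Multiset Int) = S)
    (hs : l.Pairwise (· ≤ ·)) : SL S = l := by
  unfold SL
  have hperm : (Multiset.sort S).Perm l := by
    apply Multiset.coe_eq_coe.mp
    rw [Multiset.sort_eq, hco]
  exact List.Perm.eq_of_pairwise (le := (· ≤ ·))
    (fun a b _ _ hab hba => le_antisymm hab hba)
    (Multiset.pairwise_sort S _) hs hperm

theorem sorted_concat_getD (VP W : Multiset Int) (N : Nat) (q1 : Int)
    (hcard : VP.card = N) (hcross : ∀ v ∈ VP, ∀ w ∈ W, v ≤ w)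
    (hmem : q1 ∈ W) (hmin : ∀ w ∈ W, q1 ≤ w) :
    (SL (VP + W)).getD N 0 = q1 := by
  unfold SL
  have hsplit : Multiset.sort (VP + W) = Multiset.sort VP ++ Multiset.sort W := by
    apply SL_unique
    · rw [← Multiset.coe_add, Multiset.sort_eq, Multiset.sort_eq]
    · refine List.pairwise_append.mpr ⟨Multiset.pairwise_sort VP _, Multiset.pairwise_sort W _, ?_⟩
      intro v hv w hw
      exact hcross v ((Multiset.mem_sort _).mp hv) w ((Multiset.mem_sort _).mp hw)
  rw [hsplit, List.getD_append_right _ _ _ _ (by rw [Multiset.length_sort, hcard])]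
  rw [Multiset.length_sort, hcard, Nat.sub_self]
  have hq1 : q1 ∈ Multiset.sort W := (Multiset.mem_sort _).mpr hmem
  cases heq : Multiset.sort W with
  | nil => rw [heq] at hq1; simp at hq1
  | cons w0 tail =>
    have hw0 : w0 ∈ W := (Multiset.mem_sort _).mp (by rw [heq]; exact List.mem_cons_self)
    have h1 : q1 ≤ w0 := hmin w0 hw0
    have h2 : w0 ≤ q1 := by
      rw [heq] at hq1
      rcases List.mem_cons.mp hq1 with h | h
      · rw [h]
      · have := Multiset.pairwise_sort W (fun a b : Int => a ≤ b)
        rw [heq] at this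
        exact (List.pairwise_cons.mp this).1 q1 h
    show (w0 :: tail).getD 0 0 = q1
    simp
    omega

theorem A_value (a : List Int) (hs : a.Pairwise (· ≤ ·)) (hnn : ∀ x ∈ a, 0 ≤ x)
    (k : Int) (hk : k ≤ (2:Int) ^ a.length) :
    ((((stepA a)^[(k - 1).toNat]) [((0:Int), (0:Int))]).headD (0, 0)).1
      = (SL (subsM a)).getD ((max k 1).toNat - 1) 0 := by
  have hpow : ((2:Int) ^ a.length) = ((2 ^ a.length : Nat) : Int) := by push_cast; ring
  have hone : 1 ≤ 2 ^ a.length := Nat.one_le_two_pow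
  rw [hpow] at hk
  have hN : (k - 1).toNat < 2 ^ a.length := by omega
  obtain ⟨P, hInv, hcard⟩ := loopA a hs hnn (k - 1).toNat hN
  have hne := heap_nonempty a P _ hInv (by omega)
  obtain ⟨q, rest, heq⟩ := List.exists_cons_of_ne_nil hne
  rw [heq] at hInv
  obtain ⟨h1, h2, h3, h4⟩ := hInv
  have hidx : (max k 1).toNat - 1 = (k - 1).toNat := by omega
  rw [hidx]
  have hsum : P.map Prod.fst + (((q :: rest).map (subt a)).sum).map Prod.fst = subsM a := by
    rw [← Multiset.map_add, h1, subt_fst_root]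
  rw [← hsum]
  have hy_lb : ∀ y ∈ ((q :: rest).map (subt a)).sum, ∀ p ∈ q :: rest, y ∈ subt a p → p.1 ≤ y.1 := by
    intro y _ p hp hyp
    have := subt_wt_le a hs hnn p.1 p.2 (h4 p hp) y (by rwa [Prod.mk.eta])
    exact this
  have hW : ∀ w ∈ (((q :: rest).map (subt a)).sum).map Prod.fst, ∃ p ∈ q :: rest, p.1 ≤ w := by
    intro w hw
    obtain ⟨y, hy, hyw⟩ := Multiset.mem_map.mp hw
    obtain ⟨m, hm, hym⟩ := mem_msum.mp hy
    obtain ⟨p, hp, hpm⟩ := List.mem_map.mp hm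
    refine ⟨p, hp, ?_⟩
    rw [← hyw]
    exact subt_wt_le a hs hnn p.1 p.2 (h4 p hp) y (by rw [Prod.mk.eta, hpm]; exact hym)
  rw [heq]
  show ((q :: rest).headD (0,0)).1 = _
  have := sorted_concat_getD (P.map Prod.fst) ((((q :: rest).map (subt a)).sum).map Prod.fst)
    (k - 1).toNat q.1 (by rw [Multiset.card_map, hcard]) ?cross ?mem ?min
  · rw [this]; rfl
  case cross =>
    intro v hv w hw
    obtain ⟨x, hx, hxv⟩ := Multiset.mem_map.mp hv
    obtain ⟨p, hp, hpw⟩ := hW w hw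
    calc v = x.1 := hxv.symm
    _ ≤ p.1 := h2 x hx p hp
    _ ≤ w := hpw
  case mem =>
    apply Multiset.mem_map_of_mem
    apply mem_msum.mpr
    exact ⟨subt a q, List.mem_map.mpr ⟨q, List.mem_cons_self, rfl⟩, subt_self_mem a q⟩
  case min =>
    intro w hw
    obtain ⟨p, hp, hpw⟩ := hW w hw
    exact le_trans (head_min q rest h3 p hp) hpw

-- B-side: merge lemmas
theorem bmerge_perm (u v : List Int) : (bmerge u v).Perm (u ++ v) := by
  induction u, v using bmerge.induct with
  | case1 v => simp [bmerge]
  | case2 u h => cases u with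
    | nil => simp [bmerge]
    | cons a u => simp [bmerge]
  | case3 a u b v hab ih =>
    rw [show bmerge (a :: u) (b :: v) = a :: bmerge u (b :: v) by simp [bmerge, hab]]
    exact (ih.cons a)
  | case4 a u b v hab ih =>
    rw [show bmerge (a :: u) (b :: v) = b :: bmerge (a :: u) v by simp [bmerge, hab]]
    exact (ih.cons b).trans List.perm_middle.symm

theorem mem_bmerge (z : Int) (u v : List Int) : z ∈ bmerge u v ↔ z ∈ u ∨ z ∈ v := by
  rw [(bmerge_perm u v).mem_iff]; simp

theorem bmerge_sorted (u v : List Int) (hu : u.Pairwise (· ≤ ·)) (hv : v.Pairwise (· ≤ ·)) :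
    (bmerge u v).Pairwise (· ≤ ·) := by
  induction u, v using bmerge.induct with
  | case1 v => simpa [bmerge]
  | case2 u h => cases u with
    | nil => simp [bmerge]
    | cons a u => rw [show bmerge (a :: u) [] = a :: u by simp [bmerge]]; exact hu
  | case3 a u b v hab ih =>
    rw [show bmerge (a :: u) (b :: v) = a :: bmerge u (b :: v) by simp [bmerge, hab]]
    refine List.pairwise_cons.mpr ⟨?_, ih (List.pairwise_cons.mp hu).2 hv⟩
    intro z hz
    rcases (mem_bmerge z u (b :: v)).mp hz with hz | hz
    · exact (List.pairwise_cons.mp hu).1 z hz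
    · rcases List.mem_cons.mp hz with hz | hz
      · omega
      · have := (List.pairwise_cons.mp hv).1 z hz
        omega
  | case4 a u b v hab ih =>
    rw [show bmerge (a :: u) (b :: v) = b :: bmerge (a :: u) v by simp [bmerge, hab]]
    refine List.pairwise_cons.mpr ⟨?_, ih hu (List.pairwise_cons.mp hv).2⟩
    intro z hz
    rcases (mem_bmerge z (a :: u) v).mp hz with hz | hz
    · rcases List.mem_cons.mp hz with hz | hz
      · omega
      · have := (List.pairwise_cons.mp hu).1 z hz
        omega
    · exact (List.pairwise_cons.mp hv).1 z hz

theorem SL_pairwise (S : Multiset Int) : (SL S).Pairwise (· ≤ ·) := by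
  unfold SL; exact Multiset.pairwise_sort S _

theorem bmerge_eq_SL (u v : List Int) (hu : u.Pairwise (· ≤ ·)) (hv : v.Pairwise (· ≤ ·)) :
    bmerge u v = SL ((↑u : Multiset Int) + ↑v) := by
  symm
  apply SL_unique
  · rw [Multiset.coe_add]
    exact Multiset.coe_eq_coe.mpr (bmerge_perm u v)
  · exact bmerge_sorted u v hu hv

theorem take_bmerge (u v : List Int) (K M1 M2 : Nat) (h1 : K ≤ M1) (h2 : K ≤ M2) :
    (bmerge (u.take M1) (v.take M2)).take K = (bmerge u v).take K := by
  match u, v with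
  | [], v => simp [bmerge, List.take_take, Nat.min_eq_left h2]
  | a :: u, [] =>
    simp only [List.take_nil]
    rw [show bmerge ((a :: u).take M1) [] = (a :: u).take M1 by cases (a :: u).take M1 <;> simp [bmerge]]
    rw [show bmerge (a :: u) [] = a :: u by simp [bmerge]]
    rw [List.take_take, Nat.min_eq_left h1]
  | a :: u, b :: v =>
    match K with
    | 0 => simp
    | K + 1 =>
      obtain ⟨M1', rfl⟩ : ∃ M1', M1 = M1' + 1 := ⟨M1 - 1, by omega⟩
      obtain ⟨M2', rfl⟩ : ∃ M2', M2 = M2' + 1 := ⟨M2 - 1, by omega⟩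
      simp only [List.take_succ_cons]
      by_cases hab : a ≤ b
      · rw [show bmerge (a :: u.take M1') (b :: v.take M2') = a :: bmerge (u.take M1') (b :: v.take M2') by simp [bmerge, hab]]
        rw [show bmerge (a :: u) (b :: v) = a :: bmerge u (b :: v) by simp [bmerge, hab]]
        simp only [List.take_succ_cons]
        congr 1
        have := take_bmerge u (b :: v) K M1' (M2' + 1) (by omega) (by omega)
        rw [← this]
        simp only [List.take_succ_cons]
      · rw [show bmerge (a :: u.take M1') (b :: v.take M2') = b :: bmerge (a :: u.take M1') (v.take M2') by simp [bmerge, hab]]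
        rw [show bmerge (a :: u) (b :: v) = b :: bmerge (a :: u) v by simp [bmerge, hab]]
        simp only [List.take_succ_cons]
        congr 1
        have := take_bmerge (a :: u) v K (M1' + 1) M2' (by omega) (by omega)
        rw [← this]
        simp only [List.take_succ_cons]
termination_by u.length + v.length

theorem map_SL (x : Int) (S : Multiset Int) : (SL S).map (fun b => b + x) = SL (S.map (fun b => b + x)) := by
  symm
  apply SL_unique
  · rw [← Multiset.map_coe]
    unfold SL
    rw [Multiset.sort_eq]
  · rw [List.pairwise_map]
    exact (Multiset.pairwise_sort S _).imp (by intro a b h; omega)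

theorem foldB (M : Nat) : ∀ (l w : List Int),
    l.foldl (fun best x => (bmerge best (best.map (fun b => b + x))).take M) ((SL (subsM w)).take M)
      = (SL (subsM (l.reverse ++ w))).take M := by
  intro l
  induction l with
  | nil => intro w; simp
  | cons x l ih =>
    intro w
    rw [List.foldl_cons]
    have hstep : (bmerge ((SL (subsM w)).take M) (((SL (subsM w)).take M).map (fun b => b + x))).take M
        = (SL (subsM (x :: w))).take M := by
      rw [List.map_take, map_SL, take_bmerge _ _ M M M (le_refl M) (le_refl M)]
      rw [bmerge_eq_SL _ _ (SL_pairwise _) (SL_pairwise _)]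
      have hco : ((↑(SL (subsM w)) : Multiset Int) + ↑(SL ((subsM w).map (fun b => b + x))))
          = subsM (x :: w) := by
        unfold SL
        rw [Multiset.sort_eq, Multiset.sort_eq]
        rfl
      rw [hco]
    rw [hstep, ih (x :: w)]
    congr 1
    rw [List.reverse_cons, List.append_assoc]
    rfl

-- preprocessing facts
theorem pp_aux : ∀ (l : List Int) (t : Int) (acc : List Int),
    (l.foldl (fun p x => if 0 ≤ x then (p.1 + x, p.2 ++ [x]) else (p.1, p.2 ++ [-x])) (t, acc)).2.length
      = acc.length + l.length ∧
    ∀ x ∈ (l.foldl (fun p x => if 0 ≤ x then (p.1 + x, p.2 ++ [x]) else (p.1, p.2 ++ [-x])) (t, acc)).2,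
      x ∈ acc ∨ 0 ≤ x := by
  intro l
  induction l with
  | nil => intro t acc; exact ⟨by simp, fun x hx => Or.inl hx⟩
  | cons x l ih =>
    intro t acc
    rw [List.foldl_cons]
    by_cases hx : 0 ≤ x
    · simp only [hx, if_pos]
      obtain ⟨hlen, hmem⟩ := ih (t + x) (acc ++ [x])
      constructor
      · rw [hlen]; simp; omega
      · intro z hz
        rcases hmem z hz with hz | hz
        · rcases List.mem_append.mp hz with hz | hz
          · exact Or.inl hz
          · simp at hz; omega
        · exact Or.inr hz
    · simp only [hx, if_false]
      obtain ⟨hlen, hmem⟩ := ih t (acc ++ [-x])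
      constructor
      · rw [hlen]; simp; omega
      · intro z hz
        rcases hmem z hz with hz | hz
        · rcases List.mem_append.mp hz with hz | hz
          · exact Or.inl hz
          · simp at hz; omega
        · exact Or.inr hz

theorem ppA_length (nums : List Int) : (ppA nums).2.length = nums.length := by
  have := (pp_aux nums 0 []).1
  simpa [ppA] using this

theorem ppA_nonneg (nums : List Int) : ∀ x ∈ (ppA nums).2, 0 ≤ x := by
  intro x hx
  have := (pp_aux nums 0 []).2 x (by simpa [ppA] using hx)
  simpa using this

theorem getD_take (u : List Int) (M i : Nat) (h : i < M) : (u.take M).getD i 0 = u.getD i 0 := by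
  rw [List.getD_eq_getElem?_getD, List.getD_eq_getElem?_getD, List.getElem?_take, if_pos h]

theorem kSum_spec_aux : ∀ (nums : List Int) (k : Int), Pre_kSum nums k → kSum nums k = kSum_alt nums k := by
  intro nums k hpre
  unfold Pre_kSum at hpre
  simp only [kSum, kSum_alt]
  rw [show nums.foldl (fun p x => if 0 ≤ x then (p.1 + x, p.2 ++ [x]) else (p.1, p.2 ++ [-x])) ((0:Int), ([]:List Int)) = ppA nums from rfl]
  set p := ppA nums with hp
  set a := PySem.List.sorted p.2 (fun x => x) false with ha
  have hlen : a.length = nums.length := by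
    rw [ha, PySem.List.length_sorted, ppA_length]
  have hs : a.Pairwise (· ≤ ·) := PySem.List.sorted_pairwise p.2 (fun x => x)
  have hnn : ∀ x ∈ a, 0 ≤ x := by
    intro x hx
    exact ppA_nonneg nums x ((PySem.List.mem_sorted p.2 _ false x).mp hx)
  have hk : k ≤ (2:Int) ^ a.length := by rw [hlen]; exact hpre
  have hM1 : 1 ≤ (max k 1).toNat := by omega
  -- A side
  rw [foldl_const_range (stepA a)]
  rw [A_value a hs hnn k hk]
  -- B side
  have hinit : [(0:Int)] = (SL (subsM ([] : List Int))).take (max k 1).toNat := by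
    show _ = (SL {0}).take (max k 1).toNat
    unfold SL
    rw [Multiset.sort_singleton]
    cases hmt : (max k 1).toNat with
    | zero => omega
    | succ n => simp
  rw [hinit, foldB (max k 1).toNat a []]
  have hperm : subsM (a.reverse ++ []) = subsM a := by
    rw [List.append_nil]
    exact subsM_perm _ _ (List.reverse_perm a)
  rw [hperm]
  have hidx : (max k 1 - 1).toNat = (max k 1).toNat - 1 := by omega
  rw [hidx, getD_take _ _ _ (by omega)]

-- ===== VERDICT (by name: the statement is the Claim_ definition above) =====
theorem kSum_spec : Claim_equal_kSum := by
  intro nums k _ hpre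
  unfold Spec_kSum
  exact kSum_spec_aux nums k hpre
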